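-- pv_equiv track=rewrite | github.com/magikitty/paskahousut | value_cards.py | getCardSuite
-- ===== SOURCE A (Python) =====
-- def getCardSuite(card):
--     card_suite = ""
--     space_before_word = card.rfind(" ")
--     starting_index = space_before_word + 1
--
--     for i in range(starting_index, len(card)):
--         char = card[i]
--         card_suite += char
--     return card_suite
-- ===== SOURCE B (Python) =====
-- def getCardSuite(card):
--     suite = ""
--     for ch in card:
--         suite = "" if ch == " " else suite + ch
--     return suite
-- ===== Notes on version B (the rewrite author's own statement) =====
-- stated objective: alternative
-- what changed: Replaced the rfind-then-index-loop suffix copy with a single forward pass that resets the accumulator at every space, so no space index is ever computed or indexed through.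
import Mathlib
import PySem

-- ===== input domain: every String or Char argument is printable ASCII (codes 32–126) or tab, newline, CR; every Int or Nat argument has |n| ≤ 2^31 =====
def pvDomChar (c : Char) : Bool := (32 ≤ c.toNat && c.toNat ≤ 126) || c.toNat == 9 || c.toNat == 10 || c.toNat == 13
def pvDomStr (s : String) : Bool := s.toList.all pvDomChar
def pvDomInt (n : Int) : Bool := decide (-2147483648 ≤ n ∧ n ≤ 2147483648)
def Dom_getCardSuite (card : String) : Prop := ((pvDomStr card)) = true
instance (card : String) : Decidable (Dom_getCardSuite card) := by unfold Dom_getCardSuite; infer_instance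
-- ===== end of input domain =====

-- B replaces A's rfind-then-index-loop suffix copy by a single forward pass that resets its
-- accumulator at every space (alternative decomposition, same O(n) cost).

-- ===== PORT A =====
-- rfind " ", then copy card[i] for i in range(starting_index, len(card)).
-- card[i] is always in range here (starting_index ≥ 0 and i < len), so it is ported with pyGetD.
def getCardSuite (card : String) : String :=
  let spaceBeforeWord := PySem.Str.rfind card " "
  let startingIndex := spaceBeforeWord + 1
  let cs := card.toList
  String.ofList ((PySem.List.pyRange startingIndex (PySem.List.len cs) 1).foldl
    (fun acc i => acc ++ [PySem.List.pyGetD cs i ' ']) [])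

-- ===== PORT B =====
def getCardSuite_alt (card : String) : String :=
  String.ofList (card.toList.foldl (fun acc ch => if ch = ' ' then [] else acc ++ [ch]) [])

-- ===== PRECONDITION & SPEC =====
def Spec_getCardSuite (card : String) (out : String) : Prop := out = getCardSuite_alt card
instance (card : String) (out : String) : Decidable (Spec_getCardSuite card out) := by unfold Spec_getCardSuite; infer_instance

-- ===== CLAIM (what is proved, stated in full; the proofs are below) =====
def Claim_equal_getCardSuite : Prop := ∀ (card : String), Dom_getCardSuite card → Spec_getCardSuite card (getCardSuite card)

-- ===== LEMMAS AND PROOFS =====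

lemma rfind_go_zero (l : List Char) (c : Char) :
    PySem.Chars.rfind.go l [c] 0 = if [c].isPrefixOf l then (0 : Int) else -1 := by
  simp [PySem.Chars.rfind.go]

lemma rfind_go_succ (l : List Char) (c : Char) (j : Nat) :
    PySem.Chars.rfind.go l [c] (j+1) =
      if [c].isPrefixOf (l.drop (j+1)) then ((j:Int)+1) else PySem.Chars.rfind.go l [c] j := by
  simp [PySem.Chars.rfind.go]

lemma isPrefixOf_singleton_append (c a : Char) (xs : List Char) (h : xs ≠ []) :
    [c].isPrefixOf (xs ++ [a]) = [c].isPrefixOf xs := by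
  cases xs with
  | nil => exact absurd rfl h
  | cons x xs => simp [List.isPrefixOf]

lemma rfind_go_bounds (l : List Char) (c : Char) (n : Nat) :
    -1 ≤ PySem.Chars.rfind.go l [c] n ∧ PySem.Chars.rfind.go l [c] n < (l.length : Int) := by
  induction n with
  | zero =>
    rw [rfind_go_zero]
    split_ifs with h
    · have : l ≠ [] := by
        intro he; subst he; simp [List.isPrefixOf] at h
      have : 0 < l.length := List.length_pos_iff.mpr this
      constructor <;> omega
    · constructor <;> omega
  | succ j ih =>
    rw [rfind_go_succ]
    split_ifs with h
    · have hne : l.drop (j+1) ≠ [] := by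
        intro he; rw [he] at h; simp [List.isPrefixOf] at h
      have : j + 1 < l.length := by
        by_contra hc
        exact hne (List.drop_eq_nil_of_le (by omega))
      constructor <;> omega
    · exact ih

lemma rfind_go_agree (l : List Char) (a c : Char) (j : Nat) (hj : j < l.length) :
    PySem.Chars.rfind.go (l ++ [a]) [c] j = PySem.Chars.rfind.go l [c] j := by
  induction j with
  | zero =>
    rw [rfind_go_zero, rfind_go_zero,
      isPrefixOf_singleton_append c a l (by intro he; subst he; simp at hj)]
  | succ j ih =>
    rw [rfind_go_succ, rfind_go_succ,
      List.drop_append_of_le_length (by omega),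
      isPrefixOf_singleton_append c a _ (by
        intro he
        have := List.drop_eq_nil_iff.mp he
        omega)]
    rw [ih (by omega)]

lemma prefix_singleton (c a : Char) : ([c].isPrefixOf [a]) = (c == a) := by
  simp [List.isPrefixOf]

lemma rfind_append (l : List Char) (a c : Char) :
    PySem.Chars.rfind (l ++ [a]) [c] =
      if a = c then (l.length : Int) else PySem.Chars.rfind l [c] := by
  cases l with
  | nil =>
    by_cases h : a = c
    · subst h
      show PySem.Chars.rfind.go [a] [a] 1 = _
      simp [rfind_go_succ, rfind_go_zero, List.isPrefixOf]
    · show PySem.Chars.rfind.go [a] [c] 1 = _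
      rw [if_neg h]
      show _ = PySem.Chars.rfind.go [] [c] 0
      simp [rfind_go_succ, rfind_go_zero, List.isPrefixOf, Ne.symm h]
  | cons x xs =>
    have e1 : PySem.Chars.rfind ((x :: xs) ++ [a]) [c]
        = PySem.Chars.rfind.go ((x :: xs) ++ [a]) [c] (xs.length + 2) := by
      show PySem.Chars.rfind.go _ [c] ((x :: xs) ++ [a]).length = _
      congr 1
      simp
    have e2 : PySem.Chars.rfind (x :: xs) [c]
        = PySem.Chars.rfind.go (x :: xs) [c] (xs.length + 1) := rfl
    have h1 : ((x :: xs) ++ [a]).drop (xs.length + 2) = [] := List.drop_eq_nil_of_le (by simp)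
    have h2 : ((x :: xs) ++ [a]).drop (xs.length + 1) = [a] := by
      rw [List.drop_append_of_le_length (by simp), List.drop_eq_nil_of_le (by simp)]
      simp
    have h3 : ((x :: xs) : List Char).drop (xs.length + 1) = [] :=
      List.drop_eq_nil_of_le (by simp)
    rw [e1, rfind_go_succ, h1, if_neg (by simp [List.isPrefixOf]),
      rfind_go_succ, h2, prefix_singleton]
    by_cases h : a = c
    · subst h
      simp
    · rw [if_neg (by simp; exact fun he => h he.symm), if_neg h,
        rfind_go_agree _ a c _ (by simp), e2, rfind_go_succ, h3,
        if_neg (by simp [List.isPrefixOf])]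

lemma rfind_bounds (l : List Char) (c : Char) :
    -1 ≤ PySem.Chars.rfind l [c] ∧ PySem.Chars.rfind l [c] < (l.length : Int) :=
  rfind_go_bounds l c l.length

lemma drop_rfind_eq_fold (l : List Char) :
    l.drop ((PySem.Chars.rfind l [' '] + 1).toNat) =
      l.foldl (fun acc ch => if ch = ' ' then [] else acc ++ [ch]) [] := by
  induction l using List.reverseRecOn with
  | nil => decide
  | append_singleton l a ih =>
    rw [rfind_append, List.foldl_append]
    by_cases h : a = ' '
    · rw [if_pos h]
      simp [h, List.drop_eq_nil_of_le]
    · rw [if_neg h]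
      have hb := rfind_bounds l ' '
      have hle : (PySem.Chars.rfind l [' '] + 1).toNat ≤ l.length := by omega
      rw [List.drop_append_of_le_length hle, ih]
      simp [h]

-- ===== VERDICT (by name: the statement is the Claim_ definition above) =====
theorem getCardSuite_spec : Claim_equal_getCardSuite := by
  intro card _
  show getCardSuite card = getCardSuite_alt card
  have hsp : (" " : String).toList = [' '] := by decide
  have hb := rfind_bounds card.toList ' '
  simp only [getCardSuite, getCardSuite_alt, PySem.Str.rfind_eq, hsp]
  rw [PySem.List.foldl_pyRange_pyGetD card.toList ' ' (fun acc x => acc ++ [x]) [] (by omega),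
    PySem.List.foldl_append_singleton_eq_self, List.nil_append,
    drop_rfind_eq_fold]
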